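-- pv_equiv track=rewrite | github.com/zenglenn/Polymarket_Insider | polymarket_insider/api/data_api.py | compute_backoff_schedule
-- ===== SOURCE A (Python) =====
-- from typing import Any, Iterable
--
-- def compute_backoff_schedule(
--     backoff_seconds: Iterable[int],
--     retry_max: int,
--     max_budget_s: int,
-- ) -> list[int]:
--     schedule: list[int] = []
--     remaining = max_budget_s
--     backoffs = list(backoff_seconds)
--     for attempt in range(retry_max):
--         if not backoffs:
--             break
--         delay = backoffs[min(attempt, len(backoffs) - 1)]
--         if delay <= 0 or remaining < delay:
--             break
--         schedule.append(delay)
--         remaining -= delay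
--     return schedule
-- ===== SOURCE B (Python) =====
-- def compute_backoff_schedule(backoff_seconds, retry_max, max_budget_s):
--     backoffs = list(backoff_seconds)
--     schedule = []
--     remaining = max_budget_s
--     # variable prefix: at most one pass over the distinct backoff values
--     k = max(0, min(retry_max, len(backoffs)))
--     broke = False
--     for i in range(k):
--         d = backoffs[i]
--         if d <= 0 or remaining < d:
--             broke = True
--             break
--         schedule.append(d)
--         remaining -= d
--     # constant plateau computed in closed form with a division
--     if not broke and retry_max > len(backoffs) and backoffs:
--         c = backoffs[-1]
--         n = min(remaining // c, retry_max - len(backoffs))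
--         schedule.extend([c] * n)
--     return schedule
-- ===== Notes on version B (the rewrite author's own statement) =====
-- stated objective: alternative
-- what changed: A runs one loop of retry_max iterations, re-reading the clamped last backoff each step; B walks only the prefix of listed backoffs and computes the count of repeated last-delay tail entries in closed form with an integer division.
import Mathlib
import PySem

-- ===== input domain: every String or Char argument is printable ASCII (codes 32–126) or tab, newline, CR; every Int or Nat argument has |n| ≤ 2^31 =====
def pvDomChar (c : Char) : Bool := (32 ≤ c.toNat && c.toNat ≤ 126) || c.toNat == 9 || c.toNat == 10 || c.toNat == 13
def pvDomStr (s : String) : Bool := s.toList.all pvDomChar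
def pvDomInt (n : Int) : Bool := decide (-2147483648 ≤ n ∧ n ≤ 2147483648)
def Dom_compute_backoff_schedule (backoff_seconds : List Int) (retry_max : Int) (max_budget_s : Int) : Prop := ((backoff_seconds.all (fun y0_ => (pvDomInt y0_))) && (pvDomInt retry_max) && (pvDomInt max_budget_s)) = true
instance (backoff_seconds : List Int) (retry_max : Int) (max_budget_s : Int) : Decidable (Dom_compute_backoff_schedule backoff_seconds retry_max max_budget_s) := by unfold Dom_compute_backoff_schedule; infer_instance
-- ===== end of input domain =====

-- B restructures A's single attempt loop into an explicit prefix walk over the listed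
-- backoffs plus a division-derived count for the constant tail of repeated last delays.

-- ===== PORT A =====
-- the for-loop of A: fuel = number of remaining range(retry_max) iterations,
-- attempt = current loop index; the index min attempt (len-1) is always in range
-- when backoffs ≠ [], so List.getD is exact there.
def pvALoop (backoffs : List Int) : Nat → Nat → Int → List Int → List Int
  | 0, _, _, schedule => schedule
  | fuel + 1, attempt, remaining, schedule =>
    if backoffs = [] then schedule
    else
      let delay := (backoffs[min attempt (backoffs.length - 1)]?).getD 0
      if delay ≤ 0 ∨ remaining < delay then schedule
      else pvALoop backoffs fuel (attempt + 1) (remaining - delay) (schedule ++ [delay])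

def compute_backoff_schedule (backoff_seconds : List Int) (retry_max : Int) (max_budget_s : Int) : List Int :=
  pvALoop backoff_seconds retry_max.toNat 0 max_budget_s []

-- ===== PORT B =====
-- the prefix for-loop of B; returns (schedule, remaining, broke)
def pvBPrefix (backoffs : List Int) : Nat → Nat → Int → List Int → (List Int × Int × Bool)
  | 0, _, remaining, schedule => (schedule, remaining, false)
  | k + 1, i, remaining, schedule =>
    let d := (backoffs[i]?).getD 0
    if d ≤ 0 ∨ remaining < d then (schedule, remaining, true)
    else pvBPrefix backoffs k (i + 1) (remaining - d) (schedule ++ [d])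

def compute_backoff_schedule_alt (backoff_seconds : List Int) (retry_max : Int) (max_budget_s : Int) : List Int :=
  -- k = max(0, min(retry_max, len(backoffs))); c = backoffs[-1], in range since backoff_seconds ≠ [] there
  match pvBPrefix backoff_seconds (max 0 (min retry_max (backoff_seconds.length : Int))).toNat 0 max_budget_s [] with
  | (schedule, remaining, broke) =>
    if broke = false ∧ retry_max > (backoff_seconds.length : Int) ∧ backoff_seconds ≠ [] then
      schedule ++ List.replicate (min (PySem.Int.floordiv remaining ((backoff_seconds[backoff_seconds.length - 1]?).getD 0)) (retry_max - (backoff_seconds.length : Int))).toNat ((backoff_seconds[backoff_seconds.length - 1]?).getD 0)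
    else schedule

-- ===== PRECONDITION & SPEC =====
def Spec_compute_backoff_schedule (backoff_seconds : List Int) (retry_max : Int) (max_budget_s : Int) (out : List Int) : Prop := out = compute_backoff_schedule_alt backoff_seconds retry_max max_budget_s
instance (backoff_seconds : List Int) (retry_max : Int) (max_budget_s : Int) (out : List Int) : Decidable (Spec_compute_backoff_schedule backoff_seconds retry_max max_budget_s out) := by unfold Spec_compute_backoff_schedule; infer_instance

-- ===== CLAIM (what is proved, stated in full; the proofs are below) =====
def Claim_equal_compute_backoff_schedule : Prop := ∀ (backoff_seconds : List Int) (retry_max : Int) (max_budget_s : Int), Dom_compute_backoff_schedule backoff_seconds retry_max max_budget_s → Spec_compute_backoff_schedule backoff_seconds retry_max max_budget_s (compute_backoff_schedule backoff_seconds retry_max max_budget_s)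

-- ===== LEMMAS AND PROOFS =====

-- A's loop ignores an empty list
theorem pvALoop_nil (f i : Nat) (r : Int) (s : List Int) : pvALoop [] f i r s = s := by
  cases f <;> simp [pvALoop]

-- while the attempt index stays inside the list, A's loop walks the list exactly
-- like B's prefix loop (and if the prefix breaks, A stops with the same schedule)
theorem pvALoop_split (backoffs : List Int) (hne : backoffs ≠ []) :
    ∀ (k i : Nat) (r : Int) (s : List Int) (f : Nat), i + k ≤ backoffs.length →
    pvALoop backoffs (k + f) i r s =
      (match pvBPrefix backoffs k i r s with
       | (s', r', false) => pvALoop backoffs f (i + k) r' s'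
       | (s', _, true) => s') := by
  intro k
  induction k with
  | zero => intro i r s f _; simp [pvBPrefix]
  | succ k ih =>
    intro i r s f hik
    have hlen : 0 < backoffs.length := List.length_pos_of_ne_nil hne
    have hmin : min i (backoffs.length - 1) = i := by omega
    rw [Nat.succ_add]
    simp only [pvALoop, pvBPrefix, hmin, if_neg hne]
    by_cases hbr : (backoffs[i]?).getD 0 ≤ 0 ∨ r < (backoffs[i]?).getD 0
    · simp only [if_pos hbr]
    · simp only [if_neg hbr]
      rw [ih (i + 1) (r - (backoffs[i]?).getD 0) (s ++ [(backoffs[i]?).getD 0]) f (by omega)]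
      have h2 : i + 1 + k = i + (k + 1) := by omega
      rw [h2]

-- if B's prefix completes k ≥ 1 steps without breaking, the last consumed delay
-- was positive and the remaining budget is nonnegative
theorem pvBPrefix_done (backoffs : List Int) :
    ∀ (k i : Nat) (r : Int) (s s' : List Int) (r' : Int), 1 ≤ k →
    pvBPrefix backoffs k i r s = (s', r', false) →
    0 < (backoffs[i + k - 1]?).getD 0 ∧ 0 ≤ r' := by
  intro k
  induction k with
  | zero => omega
  | succ k ih =>
    intro i r s s' r' _ h
    simp only [pvBPrefix] at h
    by_cases hbr : (backoffs[i]?).getD 0 ≤ 0 ∨ r < (backoffs[i]?).getD 0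
    · rw [if_pos hbr] at h
      exact absurd (congrArg (fun t => t.2.2) h) (by simp)
    · rw [if_neg hbr] at h
      push Not at hbr
      rcases Nat.eq_zero_or_pos k with hk | hk
      · subst hk
        simp only [pvBPrefix, Prod.mk.injEq] at h
        obtain ⟨h1, h2, _⟩ := h
        refine ⟨by simpa using hbr.1, by omega⟩
      · have := ih (i + 1) (r - (backoffs[i]?).getD 0) (s ++ [(backoffs[i]?).getD 0]) s' r' hk h
        have hidx : i + 1 + k - 1 = i + (k + 1) - 1 := by omega
        rwa [hidx] at this

-- once the attempt index has reached the last element, A's loop appends the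
-- constant last delay c, exactly min fuel (r / c) times (requires c > 0, r ≥ 0)
theorem pvALoop_plateau (backoffs : List Int) (hne : backoffs ≠ [])
    (c : Int) (hc : c = (backoffs[backoffs.length - 1]?).getD 0) (hcpos : 0 < c) :
    ∀ (f i : Nat) (r : Int) (s : List Int), 0 ≤ r → backoffs.length - 1 ≤ i →
    pvALoop backoffs f i r s = s ++ List.replicate (min f (r / c).toNat) c := by
  intro f
  induction f with
  | zero => intro i r s _ _; simp [pvALoop]
  | succ f ih =>
    intro i r s hr hi
    have hmin : min i (backoffs.length - 1) = backoffs.length - 1 := by omega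
    simp only [pvALoop, hmin, if_neg hne, ← hc]
    by_cases hbr : c ≤ 0 ∨ r < c
    · rcases hbr with h | h
      · omega
      · have hz : r / c = 0 := Int.ediv_eq_zero_of_lt hr h
        rw [if_pos (Or.inr h), hz]
        simp
    · push Not at hbr
      rw [if_neg (by push Not; exact hbr)]
      rw [ih (i + 1) (r - c) (s ++ [c]) (by omega) (by omega)]
      have hdiv : (r - c) / c = r / c - 1 := by
        have h1 : (r - c + 1 * c) / c = (r - c) / c + 1 := Int.add_mul_ediv_right _ _ (by omega)
        simp at h1
        omega
      have hge1 : 1 ≤ r / c := Int.le_ediv_iff_mul_le hcpos |>.2 (by omega)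
      have hnat : (r / c).toNat = ((r - c) / c).toNat + 1 := by omega
      rw [hnat]
      have hmn : min (f + 1) (((r - c) / c).toNat + 1) = min f (((r - c) / c).toNat) + 1 := by omega
      rw [hmn, List.replicate_succ, List.append_assoc]
      rfl

-- the unconditional equality of the two ports
theorem pv_main (backoffs : List Int) (retry_max max_budget_s : Int) :
    compute_backoff_schedule backoffs retry_max max_budget_s =
    compute_backoff_schedule_alt backoffs retry_max max_budget_s := by
  unfold compute_backoff_schedule compute_backoff_schedule_alt
  rcases eq_or_ne backoffs [] with hnil | hne
  · subst hnil
    have hk : (max 0 (min retry_max ((0:Nat):Int))).toNat = 0 := by omega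
    simp [pvALoop_nil, pvBPrefix]
  · have hlen : 0 < backoffs.length := List.length_pos_of_ne_nil hne
    by_cases hbig : retry_max > (backoffs.length : Int)
    · -- k = length: the prefix is the whole list, then the closed-form plateau
      have hk : (max 0 (min retry_max (backoffs.length : Int))).toNat = backoffs.length := by omega
      have hf : retry_max.toNat = backoffs.length + (retry_max - (backoffs.length : Int)).toNat := by omega
      rw [hk, hf, pvALoop_split backoffs hne backoffs.length 0 max_budget_s [] _ (by omega)]
      cases h : pvBPrefix backoffs backoffs.length 0 max_budget_s [] with
      | mk s' rb =>
        cases rb with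
        | mk r' broke =>
          cases broke with
          | false =>
            dsimp only
            simp only [Nat.zero_add]
            obtain ⟨hcpos, hr⟩ := pvBPrefix_done backoffs backoffs.length 0 max_budget_s [] s' r' (by omega) h
            simp only [Nat.zero_add] at hcpos
            rw [pvALoop_plateau backoffs hne _ rfl hcpos _ backoffs.length r' s' hr (by omega)]
            rw [if_pos ⟨by simp, hbig, hne⟩]
            have hfd : PySem.Int.floordiv r' ((backoffs[backoffs.length - 1]?).getD 0) =
                r' / ((backoffs[backoffs.length - 1]?).getD 0) := by
              simp only [PySem.Int.floordiv]
              exact Int.fdiv_eq_ediv_of_nonneg _ (by omega)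
            rw [hfd]
            congr 1
            have hdnn : 0 ≤ r' / ((backoffs[backoffs.length - 1]?).getD 0) :=
              Int.ediv_nonneg hr (by omega)
            congr 1
            omega
          | true => simp
    · -- k = max 0 retry_max: A's loop is exactly B's prefix, no plateau
      have hk : (max 0 (min retry_max (backoffs.length : Int))).toNat = retry_max.toNat := by omega
      have hf : retry_max.toNat = retry_max.toNat + 0 := by omega
      rw [hk, hf, pvALoop_split backoffs hne retry_max.toNat 0 max_budget_s [] 0 (by omega)]
      cases h : pvBPrefix backoffs retry_max.toNat 0 max_budget_s [] with
      | mk s' rb =>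
        cases rb with
        | mk r' broke =>
          cases broke with
          | false => simp [pvALoop, hbig]
          | true => simp [hbig]

-- ===== VERDICT (by name: the statement is the Claim_ definition above) =====
theorem compute_backoff_schedule_spec : Claim_equal_compute_backoff_schedule := by
  intro backoffs retry_max max_budget_s _
  unfold Spec_compute_backoff_schedule
  exact pv_main backoffs retry_max max_budget_s
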